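-- pv_equiv track=rewrite | github.com/Ensembl/ensembl-genes | src/python/ensembl/genes/annotation_compare/compare_busco.py | categorize_buscos
-- ===== SOURCE A (Python) =====
-- def categorize_buscos(buscos):
--     """Categorize BUSCOs by status"""
--     categories = {
--         'Complete': set(),
--         'Duplicated': set(),
--         'Fragmented': set(),
--         'Missing': set()
--     }
--
--     for busco_id, info in buscos.items():
--         status = info['status']
--         # Handle both "Complete" and "Duplicated" status
--         if status == 'Complete':
--             categories['Complete'].add(busco_id)
--         elif status == 'Duplicated':
--             categories['Duplicated'].add(busco_id)
--             categories['Complete'].add(busco_id)  # Duplicated are also complete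
--         elif status == 'Fragmented':
--             categories['Fragmented'].add(busco_id)
--         elif status == 'Missing':
--             categories['Missing'].add(busco_id)
--
--     return categories
-- ===== SOURCE B (Python) =====
-- def categorize_buscos(buscos):
--     """Categorize BUSCOs by status"""
--     return {
--         'Complete': {bid for bid, info in buscos.items()
--                      if info['status'] in ('Complete', 'Duplicated')},
--         'Duplicated': {bid for bid, info in buscos.items()
--                        if info['status'] == 'Duplicated'},
--         'Fragmented': {bid for bid, info in buscos.items()
--                        if info['status'] == 'Fragmented'},
--         'Missing': {bid for bid, info in buscos.items()
--                     if info['status'] == 'Missing'},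
--     }
-- ===== Notes on version B (the rewrite author's own statement) =====
-- stated objective: simpler
-- what changed: Replaces the single imperative branch-dispatch loop with its double-add for Duplicated by four independent declarative set comprehensions, expressing 'Duplicated are also Complete' as a membership test in the Complete filter.
import Mathlib
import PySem

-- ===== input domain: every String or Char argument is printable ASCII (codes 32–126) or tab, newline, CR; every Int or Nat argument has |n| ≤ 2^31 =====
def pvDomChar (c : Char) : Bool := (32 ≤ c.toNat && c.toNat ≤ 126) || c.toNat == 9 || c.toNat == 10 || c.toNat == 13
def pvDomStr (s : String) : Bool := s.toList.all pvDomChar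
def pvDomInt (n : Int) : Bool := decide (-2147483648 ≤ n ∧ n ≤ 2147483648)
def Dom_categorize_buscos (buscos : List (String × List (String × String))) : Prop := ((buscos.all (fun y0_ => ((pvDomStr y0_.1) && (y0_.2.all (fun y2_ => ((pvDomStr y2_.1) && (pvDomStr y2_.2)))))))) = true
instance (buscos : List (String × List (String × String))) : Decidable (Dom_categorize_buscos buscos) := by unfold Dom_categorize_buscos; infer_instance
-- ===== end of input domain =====

-- B replaces A's single branch-dispatch loop (with its imperative double-add for Duplicated)
-- by four independent declarative filtering passes, one per category; same O(n) cost, simpler.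


-- ===== PORT A =====
-- info['status'] (total form: Pre_ guarantees the key is present, so the default is never used)
def pvStatus (info : List (String × String)) : String :=
  ((PySem.Dict.mk info).get? "status").getD ""

def pvStepA (cats : PySem.Dict String (PySem.Set String))
    (p : String × List (String × String)) : PySem.Dict String (PySem.Set String) :=
  let status := pvStatus p.2
  if status = "Complete" then
    cats.modify "Complete" PySem.Set.empty (fun s => PySem.Set.add s p.1)
  else if status = "Duplicated" then
    (cats.modify "Duplicated" PySem.Set.empty (fun s => PySem.Set.add s p.1)).modify
      "Complete" PySem.Set.empty (fun s => PySem.Set.add s p.1)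
  else if status = "Fragmented" then
    cats.modify "Fragmented" PySem.Set.empty (fun s => PySem.Set.add s p.1)
  else if status = "Missing" then
    cats.modify "Missing" PySem.Set.empty (fun s => PySem.Set.add s p.1)
  else cats

def categorize_buscos (buscos : List (String × List (String × String))) : List (String × List String) :=
  (buscos.foldl pvStepA
    (PySem.Dict.ofList [("Complete", PySem.Set.empty), ("Duplicated", PySem.Set.empty),
                        ("Fragmented", PySem.Set.empty), ("Missing", PySem.Set.empty)])).items

-- ===== PORT B =====
def categorize_buscos_alt (buscos : List (String × List (String × String))) : List (String × List String) :=
  [("Complete", PySem.Set.ofList (buscos.filterMap (fun p =>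
      if pvStatus p.2 = "Complete" ∨ pvStatus p.2 = "Duplicated" then some p.1 else none))),
   ("Duplicated", PySem.Set.ofList (buscos.filterMap (fun p =>
      if pvStatus p.2 = "Duplicated" then some p.1 else none))),
   ("Fragmented", PySem.Set.ofList (buscos.filterMap (fun p =>
      if pvStatus p.2 = "Fragmented" then some p.1 else none))),
   ("Missing", PySem.Set.ofList (buscos.filterMap (fun p =>
      if pvStatus p.2 = "Missing" then some p.1 else none)))]

-- ===== PRECONDITION & SPEC =====
-- Pre_ excludes inputs where some info dict lacks the 'status' key: there Python A (and B) raise KeyError.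
def Pre_categorize_buscos (buscos : List (String × List (String × String))) : Prop :=
  (buscos.all (fun p => p.2.any (fun q => q.1 == "status"))) = true
instance (buscos : List (String × List (String × String))) : Decidable (Pre_categorize_buscos buscos) := by unfold Pre_categorize_buscos; infer_instance

def pvWitness_categorize_buscos : (List (String × List (String × String))) :=
  [("b1", [("status", "Complete")]), ("b2", [("status", "Duplicated")]),
   ("b3", [("status", "Missing")])]

def Spec_categorize_buscos (buscos : List (String × List (String × String))) (out : List (String × List String)) : Prop := out = categorize_buscos_alt buscos
instance (buscos : List (String × List (String × String))) (out : List (String × List String)) : Decidable (Spec_categorize_buscos buscos out) := by unfold Spec_categorize_buscos; infer_instance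

-- ===== CLAIM (what is proved, stated in full; the proofs are below) =====
def Claim_equal_categorize_buscos : Prop := ∀ (buscos : List (String × List (String × String))), Dom_categorize_buscos buscos → Pre_categorize_buscos buscos → Spec_categorize_buscos buscos (categorize_buscos buscos)

-- ===== LEMMAS AND PROOFS =====
-- Loop invariant: A's fold over any prefix, started from an arbitrary 4-entry state,
-- is the 4-entry dict whose sets are the per-category filtered folds of Set.add.
theorem pvLoopA (l : List (String × List (String × String))) (c d f m : PySem.Set String) :
    l.foldl pvStepA (PySem.Dict.mk [("Complete", c), ("Duplicated", d), ("Fragmented", f), ("Missing", m)]) =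
    PySem.Dict.mk
      [("Complete", (l.filterMap (fun p => if pvStatus p.2 = "Complete" ∨ pvStatus p.2 = "Duplicated" then some p.1 else none)).foldl PySem.Set.add c),
       ("Duplicated", (l.filterMap (fun p => if pvStatus p.2 = "Duplicated" then some p.1 else none)).foldl PySem.Set.add d),
       ("Fragmented", (l.filterMap (fun p => if pvStatus p.2 = "Fragmented" then some p.1 else none)).foldl PySem.Set.add f),
       ("Missing", (l.filterMap (fun p => if pvStatus p.2 = "Missing" then some p.1 else none)).foldl PySem.Set.add m)] := by
  induction l generalizing c d f m with
  | nil => rfl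
  | cons p rest ih =>
    simp only [List.foldl_cons, List.filterMap_cons, pvStepA]
    by_cases h1 : pvStatus p.2 = "Complete"
    · simp [h1, PySem.Dict.modify, PySem.Dict.insert, PySem.Dict.getD, PySem.Dict.get?, PySem.Dict.contains, ih]
    · by_cases h2 : pvStatus p.2 = "Duplicated"
      · simp [h2, PySem.Dict.modify, PySem.Dict.insert, PySem.Dict.getD, PySem.Dict.get?, PySem.Dict.contains, ih]
      · by_cases h3 : pvStatus p.2 = "Fragmented"
        · simp [h3, PySem.Dict.modify, PySem.Dict.insert, PySem.Dict.getD, PySem.Dict.get?, PySem.Dict.contains, ih]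
        · by_cases h4 : pvStatus p.2 = "Missing"
          · simp [h4, PySem.Dict.modify, PySem.Dict.insert, PySem.Dict.getD, PySem.Dict.get?, PySem.Dict.contains, ih]
          · simp [h1, h2, h3, h4, ih]

-- ===== VERDICT (by name: the statement is the Claim_ definition above) =====
theorem categorize_buscos_spec : Claim_equal_categorize_buscos := by
  intro buscos _ _
  show categorize_buscos buscos = categorize_buscos_alt buscos
  unfold categorize_buscos categorize_buscos_alt
  have : (PySem.Dict.ofList [("Complete", PySem.Set.empty), ("Duplicated", PySem.Set.empty),
      ("Fragmented", PySem.Set.empty), ("Missing", PySem.Set.empty)] : PySem.Dict String (PySem.Set String)) =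
      PySem.Dict.mk [("Complete", []), ("Duplicated", []), ("Fragmented", []), ("Missing", [])] := by decide
  rw [this, pvLoopA]
  simp [PySem.Set.ofList_eq_foldl]
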